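-- pv_equiv track=rewrite | github.com/kolashankar/nexus-main | backend/services/karma/calculator.py | get_next_milestone
-- ===== SOURCE A (Python) =====
-- from typing import Dict, Optional
--
-- def get_next_milestone(karma_points: int) -> Optional[int]:
--     """Get next karma milestone."""
--     milestones = [100, 500, 1000, 2000, 5000, -100, -500, -1000, -2000]
--
--     if karma_points >= 0:
--         # Find next positive milestone
--         for milestone in sorted([m for m in milestones if m > 0]):
--             if karma_points < milestone:
--                 return milestone
--     else:
--         # Find next negative milestone
--         for milestone in sorted([m for m in milestones if m < 0], reverse=True):
--             if karma_points > milestone: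
--                 return milestone
--
--     return None
-- ===== SOURCE B (Python) =====
-- from typing import Optional
--
-- def get_next_milestone(karma_points: int) -> Optional[int]:
--     """Get next karma milestone (extremum over a filtered candidate set)."""
--     milestones = [100, 500, 1000, 2000, 5000, -100, -500, -1000, -2000]
--     if karma_points >= 0:
--         cands = [m for m in milestones if m > 0 and karma_points < m]
--         return min(cands) if cands else None
--     cands = [m for m in milestones if m < 0 and karma_points > m]
--     return max(cands) if cands else None
-- ===== Notes on version B (the rewrite author's own statement) =====
-- stated objective: simpler
-- what changed: Replaces sort-then-linear-scan-for-first-match with a single filter of candidate milestones followed by min (positive branch) / max (negative branch); no sorting, no early-return loop.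
import Mathlib
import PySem

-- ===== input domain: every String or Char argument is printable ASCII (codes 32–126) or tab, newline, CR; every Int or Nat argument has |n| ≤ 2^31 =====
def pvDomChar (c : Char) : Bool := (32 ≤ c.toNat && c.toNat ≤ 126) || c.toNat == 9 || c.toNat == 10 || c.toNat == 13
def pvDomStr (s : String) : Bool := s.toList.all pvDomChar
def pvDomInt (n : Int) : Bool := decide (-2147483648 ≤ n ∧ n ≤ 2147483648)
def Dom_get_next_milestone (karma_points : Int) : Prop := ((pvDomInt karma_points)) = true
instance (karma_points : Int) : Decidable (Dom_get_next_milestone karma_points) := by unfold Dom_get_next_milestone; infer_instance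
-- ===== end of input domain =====

-- ===== PORT A =====
-- B replaces A's sort-then-scan with filter + min/max; return values only (no mutation).
-- scan loop of A: return the first milestone of the (already sorted) list with karma < m
def pvScanPos (karma : Int) : List Int → Option Int
  | [] => none
  | m :: rest => if karma < m then some m else pvScanPos karma rest

-- scan loop of A's negative branch: first milestone (reverse-sorted) with karma > m
def pvScanNeg (karma : Int) : List Int → Option Int
  | [] => none
  | m :: rest => if karma > m then some m else pvScanNeg karma rest

def get_next_milestone (karma_points : Int) : Option Int :=
  let milestones : List Int := [100, 500, 1000, 2000, 5000, -100, -500, -1000, -2000]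
  if karma_points ≥ 0 then
    pvScanPos karma_points (PySem.List.sorted (milestones.filter (fun m => decide (m > 0))) (fun x => x))
  else
    pvScanNeg karma_points (PySem.List.sorted (milestones.filter (fun m => decide (m < 0))) (fun x => x) true)

-- ===== PORT B =====
def get_next_milestone_alt (karma_points : Int) : Option Int :=
  let milestones : List Int := [100, 500, 1000, 2000, 5000, -100, -500, -1000, -2000]
  if karma_points ≥ 0 then
    PySem.List.min? (milestones.filter (fun m => decide (m > 0 ∧ karma_points < m))) (fun x => x)
  else
    PySem.List.max? (milestones.filter (fun m => decide (m < 0 ∧ karma_points > m))) (fun x => x)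

-- ===== PRECONDITION & SPEC =====
def Spec_get_next_milestone (karma_points : Int) (out : Option Int) : Prop := out = get_next_milestone_alt karma_points
instance (karma_points : Int) (out : Option Int) : Decidable (Spec_get_next_milestone karma_points out) := by unfold Spec_get_next_milestone; infer_instance

-- ===== CLAIM (what is proved, stated in full; the proofs are below) =====
def Claim_equal_get_next_milestone : Prop := ∀ (karma_points : Int), Dom_get_next_milestone karma_points → Spec_get_next_milestone karma_points (get_next_milestone karma_points)

-- ===== LEMMAS AND PROOFS =====

-- ===== VERDICT (by name: the statement is the Claim_ definition above) =====
theorem get_next_milestone_spec : Claim_equal_get_next_milestone := by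
  intro k _
  unfold Spec_get_next_milestone get_next_milestone get_next_milestone_alt
  by_cases h0 : k ≥ 0
  · by_cases h1 : k < 100
    · simp [h0, pvScanPos, PySem.List.sorted, PySem.List.insertBy, PySem.List.min?, show k < 500 by omega,
        show k < 1000 by omega, show k < 2000 by omega, show k < 5000 by omega, h1]
    · by_cases h2 : k < 500
      · simp [h0, pvScanPos, PySem.List.sorted, PySem.List.insertBy, PySem.List.min?, h1, h2,
          show k < 1000 by omega, show k < 2000 by omega, show k < 5000 by omega]
      · by_cases h3 : k < 1000
        · simp [h0, pvScanPos, PySem.List.sorted, PySem.List.insertBy, PySem.List.min?, h1, h2, h3,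
            show k < 2000 by omega, show k < 5000 by omega]
        · by_cases h4 : k < 2000
          · simp [h0, pvScanPos, PySem.List.sorted, PySem.List.insertBy, PySem.List.min?, h1, h2, h3, h4,
              show k < 5000 by omega]
          · by_cases h5 : k < 5000 <;>
              simp [h0, pvScanPos, PySem.List.sorted, PySem.List.insertBy, PySem.List.min?, h1, h2, h3, h4, h5]
  · by_cases h1 : k > -100
    · simp [h0, pvScanNeg, PySem.List.sorted, PySem.List.insertBy, PySem.List.max?, h1, show k > -500 by omega,
        show k > -1000 by omega, show k > -2000 by omega]
    · by_cases h2 : k > -500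
      · simp [h0, pvScanNeg, PySem.List.sorted, PySem.List.insertBy, PySem.List.max?, h1, h2,
          show k > -1000 by omega, show k > -2000 by omega]
      · by_cases h3 : k > -1000
        · simp [h0, pvScanNeg, PySem.List.sorted, PySem.List.insertBy, PySem.List.max?, h1, h2, h3,
            show k > -2000 by omega]
        · by_cases h4 : k > -2000 <;>
            simp [h0, pvScanNeg, PySem.List.sorted, PySem.List.insertBy, PySem.List.max?, h1, h2, h3, h4]
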